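-- pv_equiv track=rewrite | github.com/i-dubits/ya_training | Train_2.0/Lecture_3 (A)/E. Фибоначчи возвращается.py | fib_prime_number
-- ===== SOURCE A (Python) =====
-- def fib_prime_number(N):
--     fib_set = set()
--     a_n, a_n_m1 = 1, 0
--
--     prime_1 = 100019
--     prime_2 = 99989
--     prime_3 = 99929
--
--     a_n_prime1, a_n_m1_prime1 = a_n % prime_1, a_n_m1 % prime_1
--     a_n_prime2, a_n_m1_prime2 = a_n % prime_2, a_n_m1 % prime_2
--     a_n_prime3, a_n_m1_prime3 = a_n % prime_3, a_n_m1 % prime_3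
--
--     fib_set.add((a_n, a_n, a_n))
--     fib_set.add((a_n_m1, a_n_m1, a_n_m1))
--
--     for _ in range(2, N + 1):
--         a_n_prime1, a_n_m1_prime1 = (a_n_prime1 % prime_1 + a_n_m1_prime1 % prime_1) % prime_1, a_n_prime1
--         a_n_prime2, a_n_m1_prime2 = (a_n_prime2 % prime_2 + a_n_m1_prime2 % prime_2) % prime_2, a_n_prime2
--         a_n_prime3, a_n_m1_prime3 = (a_n_prime3 % prime_3 + a_n_m1_prime3 % prime_3) % prime_3, a_n_prime3
--
--         fib_set.add( (a_n_m1_prime1, a_n_m1_prime2, a_n_m1_prime3) )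
--
--     return fib_set
-- ===== SOURCE B (Python) =====
-- def fib_prime_number(N):
--     p1, p2, p3 = 100019, 99989, 99929
--     M = p1 * p2 * p3
--     vals = [1, 0]
--     a, b = 1, 0
--     for _ in range(2, N + 1):
--         a, b = (a + b) % M, a
--         vals.append(b)
--     return {(v % p1, v % p2, v % p3) for v in vals}
-- ===== Notes on version B (the rewrite author's own statement) =====
-- stated objective: simpler
-- what changed: B iterates a single Fibonacci pair modulo the product of the three primes and builds the residue triples in one set comprehension at the end, instead of A's six parallel per-prime residue variables with redundant re-mods and a tuple insert inside the loop.
import Mathlib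
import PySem

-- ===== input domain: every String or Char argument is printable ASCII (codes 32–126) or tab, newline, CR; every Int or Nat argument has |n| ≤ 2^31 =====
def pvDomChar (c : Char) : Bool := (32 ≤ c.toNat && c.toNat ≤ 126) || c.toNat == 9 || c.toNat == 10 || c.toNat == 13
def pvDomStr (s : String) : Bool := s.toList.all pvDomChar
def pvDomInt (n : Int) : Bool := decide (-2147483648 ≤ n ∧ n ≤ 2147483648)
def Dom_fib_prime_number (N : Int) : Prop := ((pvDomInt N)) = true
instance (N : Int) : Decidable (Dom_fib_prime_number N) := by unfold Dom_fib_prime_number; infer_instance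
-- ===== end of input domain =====

-- B keeps one Fibonacci pair modulo the product of the three primes and forms the
-- residue triples only once at the end, instead of A's six parallel residue variables
-- with a set-insert inside the loop (objective: simpler; same exact result).

-- ===== PORT A =====
-- loop body of A: state = (a1, b1, a2, b2, a3, b3, fib_set)
def pvStepA (st : Int × Int × Int × Int × Int × Int × PySem.Set (Int × Int × Int)) :
    Int × Int × Int × Int × Int × Int × PySem.Set (Int × Int × Int) :=
  let (a1, b1, a2, b2, a3, b3, s) := st
  let a1' := PySem.Int.mod (PySem.Int.mod a1 100019 + PySem.Int.mod b1 100019) 100019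
  let a2' := PySem.Int.mod (PySem.Int.mod a2 99989 + PySem.Int.mod b2 99989) 99989
  let a3' := PySem.Int.mod (PySem.Int.mod a3 99929 + PySem.Int.mod b3 99929) 99929
  -- new a_n_m1_prime_i = old a_i; the tuple added is the new (b1, b2, b3)
  (a1', a1, a2', a2, a3', a3, PySem.Set.add s (a1, a2, a3))

def fib_prime_number (N : Int) : List (Int × Int × Int) :=
  let a_n : Int := 1
  let a_n_m1 : Int := 0
  let s0 : PySem.Set (Int × Int × Int) :=
    PySem.Set.add (PySem.Set.add PySem.Set.empty (a_n, a_n, a_n)) (a_n_m1, a_n_m1, a_n_m1)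
  let st := (PySem.List.pyRange 2 (N + 1) 1).foldl (fun st _ => pvStepA st)
    (PySem.Int.mod a_n 100019, PySem.Int.mod a_n_m1 100019,
     PySem.Int.mod a_n 99989, PySem.Int.mod a_n_m1 99989,
     PySem.Int.mod a_n 99929, PySem.Int.mod a_n_m1 99929, s0)
  st.2.2.2.2.2.2

-- ===== PORT B =====
def pvM : Int := 100019 * 99989 * 99929

def pvTrip (v : Int) : Int × Int × Int :=
  (PySem.Int.mod v 100019, PySem.Int.mod v 99989, PySem.Int.mod v 99929)

-- loop body of B: state = (a, b, vals)
def pvStepB (st : Int × Int × List Int) : Int × Int × List Int :=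
  let (a, b, vals) := st
  (PySem.Int.mod (a + b) pvM, a, vals ++ [a])

def fib_prime_number_alt (N : Int) : List (Int × Int × Int) :=
  let st := (PySem.List.pyRange 2 (N + 1) 1).foldl (fun st _ => pvStepB st) (1, 0, [(1 : Int), 0])
  PySem.Set.ofList (st.2.2.map pvTrip)

-- ===== PRECONDITION & SPEC =====
def Spec_fib_prime_number (N : Int) (out : List (Int × Int × Int)) : Prop := out = fib_prime_number_alt N
instance (N : Int) (out : List (Int × Int × Int)) : Decidable (Spec_fib_prime_number N out) := by unfold Spec_fib_prime_number; infer_instance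

-- ===== CLAIM (what is proved, stated in full; the proofs are below) =====
def Claim_equal_fib_prime_number : Prop := ∀ (N : Int), Dom_fib_prime_number N → Spec_fib_prime_number N (fib_prime_number N)

-- ===== LEMMAS AND PROOFS =====

-- (x % p % p + y % p % p) % p = ((x + y) % M) % p whenever p ∣ M, 0 < p, 0 < M
lemma pvMod_step (p : Int) (hp : 0 < p) (hd : p ∣ pvM) (x y : Int) :
    PySem.Int.mod (PySem.Int.mod (PySem.Int.mod x p) p + PySem.Int.mod (PySem.Int.mod y p) p) p
      = PySem.Int.mod (PySem.Int.mod (x + y) pvM) p := by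
  have hM : (0 : Int) < pvM := by norm_num [pvM]
  simp only [PySem.Int.mod_eq_emod_of_pos hp, PySem.Int.mod_eq_emod_of_pos hM]
  rw [Int.emod_emod_of_dvd _ (dvd_refl p), Int.emod_emod_of_dvd _ (dvd_refl p),
      ← Int.add_emod, Int.emod_emod_of_dvd _ hd]

-- set built by adding one more triple
lemma pvOfList_snoc (vs : List Int) (a : Int) :
    PySem.Set.ofList ((vs ++ [a]).map pvTrip)
      = PySem.Set.add (PySem.Set.ofList (vs.map pvTrip)) (pvTrip a) := by
  simp [PySem.Set.ofList_eq_foldl, List.foldl_append]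

-- the loop invariant: A's state is B's state reduced mod each prime, with the set
-- being the deduplicated triples of B's collected values
lemma pvFold_eq (l : List Int) (a b : Int) (vs : List Int) :
    (l.foldl (fun st _ => pvStepA st)
      (PySem.Int.mod a 100019, PySem.Int.mod b 100019,
       PySem.Int.mod a 99989, PySem.Int.mod b 99989,
       PySem.Int.mod a 99929, PySem.Int.mod b 99929,
       PySem.Set.ofList (vs.map pvTrip))).2.2.2.2.2.2
    = PySem.Set.ofList (((l.foldl (fun st _ => pvStepB st) (a, b, vs)).2.2).map pvTrip) := by
  induction l generalizing a b vs with
  | nil => simp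
  | cons x xs ih =>
    simp only [List.foldl_cons, pvStepA, pvStepB]
    rw [pvMod_step 100019 (by norm_num) (by norm_num [pvM]) a b,
        pvMod_step 99989 (by norm_num) (by norm_num [pvM]) a b,
        pvMod_step 99929 (by norm_num) (by norm_num [pvM]) a b,
        show PySem.Set.add (PySem.Set.ofList (vs.map pvTrip)) (PySem.Int.mod a 100019, PySem.Int.mod a 99989, PySem.Int.mod a 99929)
            = PySem.Set.ofList ((vs ++ [a]).map pvTrip) from (pvOfList_snoc vs a).symm]
    exact ih (PySem.Int.mod (a + b) pvM) a (vs ++ [a])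

-- ===== VERDICT (by name: the statement is the Claim_ definition above) =====
theorem fib_prime_number_spec : Claim_equal_fib_prime_number := by
  intro N _
  show fib_prime_number N = fib_prime_number_alt N
  unfold fib_prime_number fib_prime_number_alt
  have hinit : (PySem.Set.add (PySem.Set.add PySem.Set.empty ((1:Int), (1:Int), (1:Int))) ((0:Int), (0:Int), (0:Int)))
      = PySem.Set.ofList (([(1 : Int), 0]).map pvTrip) := by decide
  simp only [hinit]
  exact pvFold_eq (PySem.List.pyRange 2 (N + 1) 1) 1 0 [1, 0]
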